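-- pv_equiv track=rewrite | github.com/SanyaShilov/ProjectEuler | python/problem277.py | forward_eq
-- ===== SOURCE A (Python) =====
-- def forward_eq (n, st):
--     result = ''
--     for i in range(len(st)):
--         if not n % 3:
--             if st[i] != 'D':
--                 return False
--             n //= 3
--         elif n % 3 == 1:
--             if st[i] != 'U':
--                 return False
--             n = (4*n+2)//3
--         else:
--             if st[i] != 'd':
--                 return False
--             n = (2*n-1)//3
--     return True
-- ===== SOURCE B (Python) =====
-- def forward_eq(n, st):
--     # The set of starting values that follow st is exactly one residue class
--     # modulo 3**len(st); compute that class by lifting backwards (CRT-style,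
--     # inverting each step with an explicit modular inverse of 4 or 2), then
--     # do a single modular check of n.  Invalid characters admit no start.
--     m, r = 1, 0
--     for c in reversed(st):
--         M = 3 * m
--         if c == 'D':
--             r = (3 * r) % M
--         elif c == 'U':
--             i4 = (M + 1) // 4 if M % 4 == 3 else (3 * M + 1) // 4
--             r = ((3 * r - 2) * i4) % M
--         elif c == 'd':
--             r = ((3 * r + 1) * ((M + 1) // 2)) % M
--         else:
--             return False
--         m = M
--     return n % m == r
-- ===== Notes on version B (the rewrite author's own statement) =====
-- stated objective: alternative
-- what changed: B never simulates the sequence for the given n: it computes, by backward modular lifting over reversed(st) with explicit inverses of 4 and 2, the single residue class mod 3**len(st) of all starting values that follow st, then does one modular check n % 3**len(st) == r.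
import Mathlib
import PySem

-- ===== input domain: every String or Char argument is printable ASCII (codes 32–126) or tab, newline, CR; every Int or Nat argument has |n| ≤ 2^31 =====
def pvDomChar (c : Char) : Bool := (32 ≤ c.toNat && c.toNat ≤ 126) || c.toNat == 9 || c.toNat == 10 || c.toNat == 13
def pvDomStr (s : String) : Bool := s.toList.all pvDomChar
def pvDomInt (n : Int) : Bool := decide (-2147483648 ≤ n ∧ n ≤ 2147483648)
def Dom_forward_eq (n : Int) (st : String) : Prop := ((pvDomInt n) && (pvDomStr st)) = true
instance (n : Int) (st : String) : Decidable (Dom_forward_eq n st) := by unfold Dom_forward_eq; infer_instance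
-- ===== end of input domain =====

-- B replaces A's step-by-step simulation of n with a backward modular lifting over st that
-- yields the residue class mod 3^len(st) of all valid starts, then one modular check
-- (objective: alternative).

-- ===== PORT A =====
-- A's loop over i in range(len(st)): branch on n % 3, compare st[i], update n, early return False.
def forwardEqAGo (n : Int) (cs : List Char) : Bool :=
  match cs with
  | [] => true
  | c :: rest =>
    if PySem.Int.mod n 3 = 0 then
      if c ≠ 'D' then false
      else forwardEqAGo (PySem.Int.floordiv n 3) rest
    else if PySem.Int.mod n 3 = 1 then
      if c ≠ 'U' then false
      else forwardEqAGo (PySem.Int.floordiv (4*n+2) 3) rest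
    else
      if c ≠ 'd' then false
      else forwardEqAGo (PySem.Int.floordiv (2*n-1) 3) rest

def forward_eq (n : Int) (st : String) : Bool :=
  forwardEqAGo n st.toList

-- ===== PORT B =====
-- B's loop over reversed(st) updating (r, m): structural recursion over cs computes the
-- state after consuming the whole suffix, the loop's exact order of operations.
-- none = B's early `return False` on an invalid character.
def backRes (cs : List Char) : Option (Int × Int) :=
  match cs with
  | [] => some (0, 1)
  | c :: rest =>
    match backRes rest with
    | none => none
    | some (r, m) =>
      let M := 3 * m
      if c = 'D' then some (PySem.Int.mod (3 * r) M, M)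
      else if c = 'U' then
        let i4 := if PySem.Int.mod M 4 = 3 then PySem.Int.floordiv (M + 1) 4
                  else PySem.Int.floordiv (3 * M + 1) 4
        some (PySem.Int.mod ((3 * r - 2) * i4) M, M)
      else if c = 'd' then
        some (PySem.Int.mod ((3 * r + 1) * (PySem.Int.floordiv (M + 1) 2)) M, M)
      else none

def forward_eq_alt (n : Int) (st : String) : Bool :=
  match backRes st.toList with
  | none => false
  | some (r, m) => PySem.Int.mod n m == r

-- ===== PRECONDITION & SPEC =====
def Spec_forward_eq (n : Int) (st : String) (out : Bool) : Prop := out = forward_eq_alt n st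
instance (n : Int) (st : String) (out : Bool) : Decidable (Spec_forward_eq n st out) := by unfold Spec_forward_eq; infer_instance

-- ===== CLAIM (what is proved, stated in full; the proofs are below) =====
def Claim_equal_forward_eq : Prop := ∀ (n : Int) (st : String), Dom_forward_eq n st → Spec_forward_eq n st (forward_eq n st)

-- ===== LEMMAS AND PROOFS =====

-- n % M = t is divisibility of the difference, for t in range.
theorem emodChar (n t M : Int) (hM : 0 < M) (h0 : 0 ≤ t) (h1 : t < M) :
    n % M = t ↔ M ∣ (n - t) := by
  constructor
  · intro h
    refine ⟨n / M, ?_⟩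
    have := Int.ediv_add_emod n M
    omega
  · rintro ⟨q, hq⟩
    have hn : n = t + M * q := by omega
    rw [hn, Int.add_mul_emod_self_left]
    exact Int.emod_eq_of_lt h0 h1

theorem sub_emod_dvd (a M : Int) : M ∣ a - a % M := by
  refine ⟨a / M, ?_⟩
  have := Int.ediv_add_emod a M
  omega

-- With an explicit inverse i of u mod M, "u·n ≡ s" and "n ≡ t" (where u·t ≡ s) coincide.
theorem dvd_lift (M u i t s n : Int) (hi : M ∣ u * i - 1) (ht : M ∣ u * t - s) :
    (M ∣ n - t ↔ M ∣ u * n - s) := by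
  constructor
  · intro h
    have he : u * n - s = u * (n - t) + (u * t - s) := by ring
    rw [he]
    exact dvd_add (Dvd.dvd.mul_left h u) ht
  · intro h
    have he : n - t = i * (u * n - s) - i * (u * t - s) - (u * i - 1) * (n - t) := by ring
    rw [he]
    exact dvd_sub (dvd_sub (Dvd.dvd.mul_left h i) (Dvd.dvd.mul_left ht i)) (Dvd.dvd.mul_right hi _)

-- If backRes finds an invalid character, A returns False for every n.
theorem backRes_none (cs : List Char) (h : backRes cs = none) :
    ∀ n : Int, forwardEqAGo n cs = false := by
  induction cs with
  | nil => simp [backRes] at h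
  | cons c rest ih =>
    intro n
    simp only [backRes] at h
    cases hb : backRes rest with
    | none =>
      simp only [forwardEqAGo]
      split_ifs with h0 hD h1 hU hd <;> first | rfl | exact ih hb _
    | some p =>
      rw [hb] at h
      obtain ⟨r, m⟩ := p
      simp only [forwardEqAGo]
      split_ifs at h with hD hU hd
      split_ifs with h0 hcD h1 hcU hcd <;> rfl

-- Main invariant: backRes cs = some (r, m) characterises A's acceptance as n % m = r.
theorem backRes_some (cs : List Char) : ∀ r m : Int, backRes cs = some (r, m) →
    0 < m ∧ m % 2 = 1 ∧ 0 ≤ r ∧ r < m ∧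
      ∀ n : Int, (forwardEqAGo n cs = true ↔ n % m = r) := by
  induction cs with
  | nil =>
    intro r m h
    simp only [backRes, Option.some.injEq, Prod.mk.injEq] at h
    obtain ⟨rfl, rfl⟩ := h
    refine ⟨one_pos, by decide, le_refl 0, one_pos, fun n => ?_⟩
    simp [forwardEqAGo]
  | cons c rest ih =>
    intro r m h
    simp only [backRes] at h
    cases hb : backRes rest with
    | none => rw [hb] at h; exact absurd h (by simp)
    | some p =>
      rw [hb] at h
      obtain ⟨r0, m0⟩ := p
      obtain ⟨hm0, hodd0, hr0l, hr0u, hiff0⟩ := ih r0 m0 hb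
      have hM : (0:Int) < 3 * m0 := by omega
      have hMne : (3 * m0 : Int) ≠ 0 := by omega
      have hModd : (3 * m0) % 2 = 1 := by omega
      have h3ne : (3:Int) ≠ 0 := by norm_num
      have hmodM : ∀ a : Int, PySem.Int.mod a (3 * m0) = a % (3 * m0) :=
        fun a => PySem.Int.mod_eq_emod_of_pos hM
      have hmod4 : PySem.Int.mod (3 * m0) 4 = (3 * m0) % 4 :=
        PySem.Int.mod_eq_emod_of_pos (by norm_num)
      have hfd4 : ∀ a : Int, PySem.Int.floordiv a 4 = a / 4 :=
        fun a => PySem.Int.floordiv_eq_ediv_of_pos (by norm_num)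
      have hfd2 : ∀ a : Int, PySem.Int.floordiv a 2 = a / 2 :=
        fun a => PySem.Int.floordiv_eq_ediv_of_pos (by norm_num)
      have hmod3 : ∀ a : Int, PySem.Int.mod a 3 = a % 3 :=
        fun a => PySem.Int.mod_eq_emod_of_pos (by norm_num)
      have hfd3 : ∀ a : Int, PySem.Int.floordiv a 3 = a / 3 :=
        fun a => PySem.Int.floordiv_eq_ediv_of_pos (by norm_num)
      simp only [hmodM, hmod4, hfd4, hfd2] at h
      by_cases hcD : c = 'D'
      -- ===== c = 'D' =====
      · rw [if_pos hcD] at h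
        subst hcD
        simp only [Option.some.injEq, Prod.mk.injEq] at h
        obtain ⟨hr, hm⟩ := h
        have hr3 : (3 * r0) % (3 * m0) = 3 * r0 :=
          Int.emod_eq_of_lt (by omega) (by omega)
        rw [hr3] at hr
        subst hr
        subst hm
        refine ⟨hM, hModd, by omega, by omega, fun n => ?_⟩
        have hb3 : 0 ≤ n % 3 ∧ n % 3 < 3 :=
          ⟨Int.emod_nonneg n (by norm_num), Int.emod_lt_of_pos n (by norm_num)⟩
        have hreject : n % 3 ≠ 0 → ¬ n % (3 * m0) = 3 * r0 := by
          intro hn hc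
          rw [emodChar _ _ _ hM (by omega) (by omega)] at hc
          obtain ⟨q, hq⟩ := hc
          have hx : ∃ x, n - 3 * r0 = 3 * x := ⟨m0 * q, by rw [hq]; ring⟩
          obtain ⟨x, hxe⟩ := hx
          omega
        simp only [forwardEqAGo, hmod3, hfd3]
        by_cases h0 : n % 3 = 0
        · rw [if_pos h0, if_neg (by decide : ¬ ('D' : Char) ≠ 'D')]
          have e1 := emodChar (n / 3) r0 m0 hm0 hr0l hr0u
          have e3 : (3:Int) * (n / 3 - r0) = n - 3 * r0 := by
            have hdv : (3:Int) ∣ n := Int.dvd_of_emod_eq_zero h0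
            rw [mul_sub, Int.mul_ediv_cancel' hdv]
          have e2 : m0 ∣ n / 3 - r0 ↔ 3 * m0 ∣ n - 3 * r0 := by
            rw [← e3]
            exact (mul_dvd_mul_iff_left h3ne).symm
          have e5 := (emodChar n (3 * r0) (3 * m0) hM (by omega) (by omega)).symm
          exact (hiff0 _).trans (e1.trans (e2.trans e5))
        · refine iff_of_false ?_ (hreject h0)
          by_cases h1 : n % 3 = 1
          · rw [if_neg h0, if_pos h1, if_pos (by decide : ('D' : Char) ≠ 'U')]
            simp
          · rw [if_neg h0, if_neg h1, if_pos (by decide : ('D' : Char) ≠ 'd')]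
            simp
      · by_cases hcU : c = 'U'
        -- ===== c = 'U' =====
        · rw [if_neg hcD, if_pos hcU] at h
          subst hcU
          set i4 : Int := if (3 * m0) % 4 = 3 then (3 * m0 + 1) / 4
                          else (3 * (3 * m0) + 1) / 4 with hi4def
          have hi : (3 * m0) ∣ 4 * i4 - 1 := by
            rw [hi4def]
            by_cases h4 : (3 * m0) % 4 = 3
            · rw [if_pos h4]; exact ⟨1, by omega⟩
            · rw [if_neg h4]; exact ⟨3, by omega⟩
          set t : Int := ((3 * r0 - 2) * i4) % (3 * m0) with htdef
          have htl : 0 ≤ t := Int.emod_nonneg _ hMne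
          have htu : t < 3 * m0 := Int.emod_lt_of_pos _ hM
          have htd : (3 * m0) ∣ 4 * t - (3 * r0 - 2) := by
            have h' : (3 * m0) ∣ (3 * r0 - 2) * i4 - t := htdef ▸ sub_emod_dvd _ _
            have he : 4 * t - (3 * r0 - 2)
                = (3 * r0 - 2) * (4 * i4 - 1) - 4 * ((3 * r0 - 2) * i4 - t) := by ring
            rw [he]
            exact dvd_sub (Dvd.dvd.mul_left hi _) (Dvd.dvd.mul_left h' 4)
          simp only [Option.some.injEq, Prod.mk.injEq] at h
          obtain ⟨hr, hm⟩ := h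
          subst hr
          subst hm
          refine ⟨hM, hModd, htl, htu, fun n => ?_⟩
          have hb3 : 0 ≤ n % 3 ∧ n % 3 < 3 :=
            ⟨Int.emod_nonneg n (by norm_num), Int.emod_lt_of_pos n (by norm_num)⟩
          have hreject : n % 3 ≠ 1 → ¬ n % (3 * m0) = t := by
            intro hn hc
            rw [emodChar _ _ _ hM htl htu] at hc
            obtain ⟨q, hq⟩ := hc
            obtain ⟨a, ha⟩ := htd
            have h1 : ∃ x, n - t = 3 * x := ⟨m0 * q, by rw [hq]; ring⟩
            have h2 : ∃ y, 4 * t - (3 * r0 - 2) = 3 * y := ⟨m0 * a, by rw [ha]; ring⟩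
            obtain ⟨x, hx⟩ := h1
            obtain ⟨y, hy⟩ := h2
            omega
          simp only [forwardEqAGo, hmod3, hfd3]
          by_cases h0 : n % 3 = 0
          · rw [if_pos h0, if_pos (by decide : ('U' : Char) ≠ 'D')]
            exact iff_of_false (by simp) (hreject (by omega))
          · by_cases h1 : n % 3 = 1
            · rw [if_neg h0, if_pos h1, if_neg (by decide : ¬ ('U' : Char) ≠ 'U')]
              have e1 := emodChar ((4 * n + 2) / 3) r0 m0 hm0 hr0l hr0u
              have e3 : (3:Int) * ((4 * n + 2) / 3 - r0) = 4 * n - (3 * r0 - 2) := by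
                have hdv : (3:Int) ∣ 4 * n + 2 := by
                  have := Int.ediv_add_emod n 3
                  exact ⟨4 * (n / 3) + 2, by omega⟩
                rw [mul_sub, Int.mul_ediv_cancel' hdv]; ring
              have e2 : m0 ∣ (4 * n + 2) / 3 - r0 ↔ 3 * m0 ∣ 4 * n - (3 * r0 - 2) := by
                rw [← e3]
                exact (mul_dvd_mul_iff_left h3ne).symm
              have e4 := (dvd_lift (3 * m0) 4 i4 t (3 * r0 - 2) n hi htd).symm
              have e5 := (emodChar n t (3 * m0) hM htl htu).symm
              exact (hiff0 _).trans (e1.trans (e2.trans (e4.trans e5)))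
            · rw [if_neg h0, if_neg h1, if_pos (by decide : ('U' : Char) ≠ 'd')]
              exact iff_of_false (by simp) (hreject h1)
        · by_cases hcd : c = 'd'
          -- ===== c = 'd' =====
          · rw [if_neg hcD, if_neg hcU, if_pos hcd] at h
            subst hcd
            set i2 : Int := (3 * m0 + 1) / 2 with hi2def
            have hi : (3 * m0) ∣ 2 * i2 - 1 := ⟨1, by omega⟩
            set t : Int := ((3 * r0 + 1) * i2) % (3 * m0) with htdef
            have htl : 0 ≤ t := Int.emod_nonneg _ hMne
            have htu : t < 3 * m0 := Int.emod_lt_of_pos _ hM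
            have htd : (3 * m0) ∣ 2 * t - (3 * r0 + 1) := by
              have h' : (3 * m0) ∣ (3 * r0 + 1) * i2 - t := htdef ▸ sub_emod_dvd _ _
              have he : 2 * t - (3 * r0 + 1)
                  = (3 * r0 + 1) * (2 * i2 - 1) - 2 * ((3 * r0 + 1) * i2 - t) := by ring
              rw [he]
              exact dvd_sub (Dvd.dvd.mul_left hi _) (Dvd.dvd.mul_left h' 2)
            simp only [Option.some.injEq, Prod.mk.injEq] at h
            obtain ⟨hr, hm⟩ := h
            subst hr
            subst hm
            refine ⟨hM, hModd, htl, htu, fun n => ?_⟩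
            have hb3 : 0 ≤ n % 3 ∧ n % 3 < 3 :=
              ⟨Int.emod_nonneg n (by norm_num), Int.emod_lt_of_pos n (by norm_num)⟩
            have hreject : n % 3 ≠ 2 → ¬ n % (3 * m0) = t := by
              intro hn hc
              rw [emodChar _ _ _ hM htl htu] at hc
              obtain ⟨q, hq⟩ := hc
              obtain ⟨a, ha⟩ := htd
              have h1 : ∃ x, n - t = 3 * x := ⟨m0 * q, by rw [hq]; ring⟩
              have h2 : ∃ y, 2 * t - (3 * r0 + 1) = 3 * y := ⟨m0 * a, by rw [ha]; ring⟩
              obtain ⟨x, hx⟩ := h1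
              obtain ⟨y, hy⟩ := h2
              omega
            simp only [forwardEqAGo, hmod3, hfd3]
            by_cases h0 : n % 3 = 0
            · rw [if_pos h0, if_pos (by decide : ('d' : Char) ≠ 'D')]
              exact iff_of_false (by simp) (hreject (by omega))
            · by_cases h1 : n % 3 = 1
              · rw [if_neg h0, if_pos h1, if_pos (by decide : ('d' : Char) ≠ 'U')]
                exact iff_of_false (by simp) (hreject (by omega))
              · rw [if_neg h0, if_neg h1, if_neg (by decide : ¬ ('d' : Char) ≠ 'd')]
                have h2 : n % 3 = 2 := by omega
                have e1 := emodChar ((2 * n - 1) / 3) r0 m0 hm0 hr0l hr0u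
                have e3 : (3:Int) * ((2 * n - 1) / 3 - r0) = 2 * n - (3 * r0 + 1) := by
                  have hdv : (3:Int) ∣ 2 * n - 1 := by
                    have := Int.ediv_add_emod n 3
                    exact ⟨2 * (n / 3) + 1, by omega⟩
                  rw [mul_sub, Int.mul_ediv_cancel' hdv]; ring
                have e2 : m0 ∣ (2 * n - 1) / 3 - r0 ↔ 3 * m0 ∣ 2 * n - (3 * r0 + 1) := by
                  rw [← e3]
                  exact (mul_dvd_mul_iff_left h3ne).symm
                have e4 := (dvd_lift (3 * m0) 2 i2 t (3 * r0 + 1) n hi htd).symm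
                have e5 := (emodChar n t (3 * m0) hM htl htu).symm
                exact (hiff0 _).trans (e1.trans (e2.trans (e4.trans e5)))
          -- ===== invalid character =====
          · rw [if_neg hcD, if_neg hcU, if_neg hcd] at h
            exact absurd h (by simp)

-- ===== VERDICT (by name: the statement is the Claim_ definition above) =====
theorem forward_eq_spec : Claim_equal_forward_eq := by
  intro n st _
  unfold Spec_forward_eq forward_eq forward_eq_alt
  cases h : backRes st.toList with
  | none => exact backRes_none st.toList h n
  | some p =>
    obtain ⟨r, m⟩ := p
    obtain ⟨hm, -, -, -, hiff⟩ := backRes_some st.toList r m h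
    show forwardEqAGo n st.toList = (PySem.Int.mod n m == r)
    rw [PySem.Int.mod_eq_emod_of_pos hm]
    by_cases hn : n % m = r
    · simp [hn, (hiff n).mpr hn]
    · have hf : forwardEqAGo n st.toList = false := by
        cases hbv : forwardEqAGo n st.toList with
        | false => rfl
        | true => exact absurd ((hiff n).mp hbv) hn
      simp [hf, hn]
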